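-- pv_equiv track=rewrite | github.com/calebgetahun/question-solutions | CodeForces/Contests/Round 1017 (Div. 4)/boneca_ambalabu.py | using_bitmasks
-- ===== SOURCE A (Python) =====
-- def using_bitmasks(arr):
--     n = len(arr)
--     bit_count = [0] * 30
--     for num in arr:
--         for j in range(30):
--             if num & (1 << j):
--                 bit_count[j] += 1
--
--     max_xor = 0
--     for k in range(n):
--         curr_xor = 0
--         for j in range(30):
--             if arr[k] & (1 << j):
--                 #we have a 1 in that bit position, meaning we'd need a 0 to make our xor
--                 curr_xor += (n - bit_count[j]) * (1 << j)
--             else: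
--                 #there is a 0 at this position, meaning we'd need a
--                 curr_xor += bit_count[j] * (1 << j)
--         max_xor = max(max_xor, curr_xor)
--
--     return max_xor
-- ===== SOURCE B (Python) =====
-- def using_bitmasks(arr):
--     mask = (1 << 30) - 1
--     best = 0
--     for x in arr:
--         total = 0
--         for y in arr:
--             total += (x ^ y) & mask
--         best = max(best, total)
--     return best
-- ===== Notes on version B (the rewrite author's own statement) =====
-- stated objective: simpler
-- what changed: Replaces the precomputed per-bit count table and per-bit reconstruction with a direct pairwise summation of (x ^ y) & ((1<<30)-1), the 30-bit mask A's bit loop implicitly applies.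
import Mathlib
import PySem

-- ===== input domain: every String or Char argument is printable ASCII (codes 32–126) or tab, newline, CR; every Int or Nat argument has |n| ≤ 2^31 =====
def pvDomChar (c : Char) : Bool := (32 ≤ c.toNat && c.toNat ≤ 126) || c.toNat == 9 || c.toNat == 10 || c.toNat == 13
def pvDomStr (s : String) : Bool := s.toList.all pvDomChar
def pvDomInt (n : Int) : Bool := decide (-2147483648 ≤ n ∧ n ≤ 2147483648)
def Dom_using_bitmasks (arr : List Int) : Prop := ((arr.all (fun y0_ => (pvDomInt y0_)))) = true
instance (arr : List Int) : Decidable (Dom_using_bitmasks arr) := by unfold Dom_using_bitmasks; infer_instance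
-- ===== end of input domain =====

-- B replaces A's per-bit count table and per-bit reconstruction by a direct pairwise
-- summation of masked XORs (simpler; no speed claim).

-- ===== PORT A =====
def using_bitmasks (arr : List Int) : Int :=
  let n : Int := PySem.List.len arr
  let bit_count : List Int :=
    arr.foldl (fun bc num =>
      (List.range 30).foldl (fun b (j : Nat) =>
        if PySem.Int.band num ((1:Int) <<< j) ≠ 0 then b.set j (b.getD j 0 + 1) else b) bc)
      (List.replicate 30 0)
  (PySem.List.pyRange 0 n).foldl (fun mx k =>
    let curr : Int := (List.range 30).foldl (fun acc (j : Nat) =>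
      if PySem.Int.band (PySem.List.pyGetD arr k 0) ((1:Int) <<< j) ≠ 0 then
        acc + (n - bit_count.getD j 0) * ((1:Int) <<< j)
      else
        acc + bit_count.getD j 0 * ((1:Int) <<< j)) 0
    max mx curr) 0

-- ===== PORT B =====
def using_bitmasks_alt (arr : List Int) : Int :=
  let mask : Int := ((1:Int) <<< (30:Nat)) - 1
  arr.foldl (fun best x =>
    max best (arr.foldl (fun total y => total + PySem.Int.band (PySem.Int.bxor x y) mask) 0)) 0

-- ===== PRECONDITION & SPEC =====
def Spec_using_bitmasks (arr : List Int) (out : Int) : Prop := out = using_bitmasks_alt arr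
instance (arr : List Int) (out : Int) : Decidable (Spec_using_bitmasks arr out) := by unfold Spec_using_bitmasks; infer_instance

-- ===== CLAIM (what is proved, stated in full; the proofs are below) =====
def Claim_equal_using_bitmasks : Prop := ∀ (arr : List Int), Dom_using_bitmasks arr → Spec_using_bitmasks arr (using_bitmasks arr)

-- ===== LEMMAS AND PROOFS =====

-- Python's bit j of an arbitrary integer (infinite two's complement).
def bitB (z : Int) (j : Nat) : Bool := if 0 ≤ z then z.toNat.testBit j else !((-z-1).toNat.testBit j)

-- number of elements of l whose bit j is set
def cnt (l : List Int) (j : Nat) : Int := (l.map (fun y => if bitB y j then (1:Int) else 0)).sum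

lemma shl_one (j : Nat) : (1:Int) <<< j = (2:Int)^j := by
  rw [Int.shiftLeft_eq, one_mul]

lemma pow_cast (j : Nat) : (2:Int)^j = ((2^j : Nat) : Int) := by push_cast; ring

lemma band_pow_ne_zero (z : Int) (j : Nat) :
    (PySem.Int.band z ((1:Int) <<< j) ≠ 0) ↔ bitB z j = true := by
  rw [shl_one, pow_cast]
  unfold PySem.Int.band bitB
  by_cases h : 0 ≤ z
  · simp only [h, if_true, Int.natCast_nonneg, Int.toNat_natCast]
    rw [Nat.and_two_pow]
    cases hb : z.toNat.testBit j <;> simp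
  · simp only [h, if_false, Int.natCast_nonneg, if_true, Int.toNat_natCast]
    rw [Nat.two_pow_and]
    have hp : (0:Nat) < 2^j := by positivity
    cases hb : (-z-1).toNat.testBit j <;> simp

lemma bitB_bxor (x y : Int) (j : Nat) :
    bitB (PySem.Int.bxor x y) j = (bitB x j ^^ bitB y j) := by
  unfold PySem.Int.bxor bitB
  by_cases hx : 0 ≤ x <;> by_cases hy : 0 ≤ y
  · simp only [hx, hy, if_true, Int.natCast_nonneg, Int.toNat_natCast, Nat.testBit_xor]
  · have h1 : ¬ (0:Int) ≤ -(↑(x.toNat ^^^ (-y-1).toNat)) - 1 := by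
      have : (0:Int) ≤ ↑(x.toNat ^^^ (-y-1).toNat) := Int.natCast_nonneg _
      omega
    have h2 : (-(-(↑(x.toNat ^^^ (-y-1).toNat) : Int) - 1) - 1) = ↑(x.toNat ^^^ (-y-1).toNat) := by ring
    simp only [hx, hy, if_true, if_false, h1, h2, Int.toNat_natCast, Nat.testBit_xor]
    cases x.toNat.testBit j <;> cases (-y-1).toNat.testBit j <;> rfl
  · have h1 : ¬ (0:Int) ≤ -(↑((-x-1).toNat ^^^ y.toNat)) - 1 := by
      have : (0:Int) ≤ ↑((-x-1).toNat ^^^ y.toNat) := Int.natCast_nonneg _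
      omega
    have h2 : (-(-(↑((-x-1).toNat ^^^ y.toNat) : Int) - 1) - 1) = ↑((-x-1).toNat ^^^ y.toNat) := by ring
    simp only [hx, hy, if_true, if_false, h1, h2, Int.toNat_natCast, Nat.testBit_xor]
    cases (-x-1).toNat.testBit j <;> cases y.toNat.testBit j <;> rfl
  · simp only [hx, hy, if_false, Int.natCast_nonneg, if_true, Int.toNat_natCast, Nat.testBit_xor]
    cases (-x-1).toNat.testBit j <;> cases (-y-1).toNat.testBit j <;> rfl

lemma sum_bits (m c : Nat) :
    ((List.range c).map (fun j => if m.testBit j then ((2:Int)^j) else 0)).sum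
      = ((m % 2^c : Nat) : Int) := by
  induction c with
  | zero => simp
  | succ c ih =>
    rw [List.range_succ, List.map_append, List.sum_append, ih]
    simp only [List.map_cons, List.map_nil, List.sum_cons, List.sum_nil, add_zero]
    rw [Nat.testBit_eq_decide_div_mod_eq]
    have h := @Nat.mod_pow_succ m 2 c
    by_cases hb : m / 2^c % 2 = 1
    · simp only [hb, decide_true, if_true]
      push_cast [h, hb]
      ring
    · have h2 : m / 2^c % 2 = 0 := by omega
      simp only [hb, decide_false]
      push_cast [h, h2]
      ring

lemma sum_pows (c : Nat) :
    ((List.range c).map (fun j => ((2:Int)^j))).sum = 2^c - 1 := by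
  induction c with
  | zero => simp
  | succ c ih => rw [List.range_succ]; simp [ih]; ring

lemma band_mask (z : Int) :
    PySem.Int.band z (((1:Int) <<< (30:Nat)) - 1)
      = ((List.range 30).map (fun j => if bitB z j then ((2:Int)^j) else 0)).sum := by
  have hm : (((1:Int) <<< (30:Nat)) - 1) = ((2^30 - 1 : Nat) : Int) := by
    rw [shl_one, pow_cast]; norm_num
  rw [hm]
  unfold PySem.Int.band
  by_cases h : 0 ≤ z
  · simp only [h, if_true, Int.natCast_nonneg, Int.toNat_natCast]
    rw [Nat.and_two_pow_sub_one_eq_mod, ← sum_bits z.toNat 30]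
    apply congrArg
    apply List.map_congr_left
    intro j _
    simp [bitB, h]
  · simp only [h, if_false, Int.natCast_nonneg, if_true, Int.toNat_natCast]
    have hsum : ((List.range 30).map (fun j => if bitB z j then ((2:Int)^j) else 0)).sum
        + ((List.range 30).map (fun j => if (-z-1).toNat.testBit j then ((2:Int)^j) else 0)).sum
        = ((List.range 30).map (fun j => ((2:Int)^j))).sum := by
      rw [← PySem.List.sum_map_add_int]
      apply congrArg
      apply List.map_congr_left
      intro j _
      simp only [bitB, h, if_false]
      cases hb : (-z-1).toNat.testBit j <;> simp
    rw [sum_bits, sum_pows] at hsum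
    have hand : 2^30 - 1 &&& (-z-1).toNat = (-z-1).toNat % 2^30 := by
      rw [Nat.and_comm, Nat.and_two_pow_sub_one_eq_mod]
    rw [hand]
    have hlt : (-z-1).toNat % 2^30 < 2^30 := Nat.mod_lt _ (by positivity)
    omega

-- per-element identity: A's bitwise reconstruction equals B's pairwise sum
lemma curr_eq_pairwise (x : Int) (l : List Int) :
    ((List.range 30).map (fun j =>
        (if bitB x j then ((l.length : Int) - cnt l j) else cnt l j) * ((2:Int)^j))).sum
      = (l.map (fun y => PySem.Int.band (PySem.Int.bxor x y) (((1:Int) <<< (30:Nat)) - 1))).sum := by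
  induction l with
  | nil =>
    simp only [List.map_nil, List.sum_nil, List.length_nil]
    rw [show ((List.range 30).map (fun j =>
        (if bitB x j then (((0:Nat) : Int) - cnt [] j) else cnt [] j) * ((2:Int)^j))) =
        (List.range 30).map (fun _ => (0:Int)) from
      List.map_congr_left (fun j _ => by cases hb : bitB x j <;> simp [cnt])]
    simp
  | cons a l ih =>
    have hstep : ∀ j ∈ List.range 30,
        (if bitB x j then (((a :: l).length : Int) - cnt (a :: l) j) else cnt (a :: l) j) * ((2:Int)^j)
        = (if bitB x j then ((l.length : Int) - cnt l j) else cnt l j) * ((2:Int)^j)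
          + (if bitB (PySem.Int.bxor x a) j then ((2:Int)^j) else 0) := by
      intro j _
      rw [bitB_bxor]
      have hc : cnt (a :: l) j = (if bitB a j then (1:Int) else 0) + cnt l j := by
        simp [cnt]
      have hl : (((a :: l).length : Int)) = (l.length : Int) + 1 := by
        simp [List.length_cons]
      rw [hc, hl]
      cases hx : bitB x j <;> cases ha : bitB a j <;> simp <;> try ring

    rw [List.map_congr_left hstep, PySem.List.sum_map_add_int, ih, ← band_mask]
    simp only [List.map_cons, List.sum_cons]
    ring

-- length invariant of A's inner bit-count update loop
lemma inner_len (num : Int) (m : Nat) (bc : List Int) :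
    ((List.range m).foldl (fun b (j : Nat) =>
        if PySem.Int.band num ((1:Int) <<< j) ≠ 0 then b.set j (b.getD j 0 + 1) else b) bc).length
      = bc.length := by
  induction m with
  | zero => simp
  | succ m ih =>
    rw [List.range_succ, List.foldl_append]
    simp only [List.foldl_cons, List.foldl_nil]
    by_cases hb : PySem.Int.band num ((1:Int) <<< m) ≠ 0
    · rw [if_pos hb]; rw [List.length_set]; exact ih
    · rw [if_neg hb]; exact ih

-- pointwise effect of A's inner bit-count update loop
lemma inner_getD (num : Int) (m : Nat) (bc : List Int) (j : Nat) (hj : j < bc.length) :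
    ((List.range m).foldl (fun b (j : Nat) =>
        if PySem.Int.band num ((1:Int) <<< j) ≠ 0 then b.set j (b.getD j 0 + 1) else b) bc).getD j 0
      = bc.getD j 0 + (if j < m ∧ bitB num j then 1 else 0) := by
  induction m with
  | zero => simp
  | succ m ih =>
    rw [List.range_succ, List.foldl_append]
    simp only [List.foldl_cons, List.foldl_nil]
    set L := (List.range m).foldl (fun b (j : Nat) =>
        if PySem.Int.band num ((1:Int) <<< j) ≠ 0 then b.set j (b.getD j 0 + 1) else b) bc with hL
    have hLlen : L.length = bc.length := inner_len num m bc
    by_cases hb : PySem.Int.band num ((1:Int) <<< m) ≠ 0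
    · have hbit : bitB num m = true := (band_pow_ne_zero num m).mp hb
      rw [if_pos hb]
      by_cases hjm : j = m
      · subst hjm
        rw [List.getD_eq_getElem?_getD, List.getElem?_set, if_pos rfl,
            if_pos (by rw [hLlen]; exact hj)]
        simp only [Option.getD_some]
        rw [ih, hbit]
        simp only [Nat.lt_irrefl, if_false, and_true, Nat.lt_succ_self]
        split_ifs <;> omega
      · rw [List.getD_eq_getElem?_getD, List.getElem?_set, if_neg (fun hh => hjm hh.symm),
            ← List.getD_eq_getElem?_getD, ih]
        have heq : (j < m + 1 ∧ bitB num j = true) ↔ (j < m ∧ bitB num j = true) := by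
          constructor
          · rintro ⟨h1, h2⟩; exact ⟨by omega, h2⟩
          · rintro ⟨h1, h2⟩; exact ⟨by omega, h2⟩
        simp only [heq]
    · have hbit : bitB num m = false := by
        cases hx : bitB num m
        · rfl
        · exact absurd ((band_pow_ne_zero num m).mpr hx) hb
      rw [if_neg hb, ih]
      have heq : (j < m + 1 ∧ bitB num j = true) ↔ (j < m ∧ bitB num j = true) := by
        constructor
        · rintro ⟨h1, h2⟩
          refine ⟨?_, h2⟩
          rcases Nat.lt_succ_iff_lt_or_eq.mp h1 with h | h
          · exact h
          · subst h; rw [hbit] at h2; cases h2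
        · rintro ⟨h1, h2⟩; exact ⟨by omega, h2⟩
      simp only [heq]

-- A's first pass computes the per-bit counts
lemma bc_spec (l : List Int) (bc : List Int) (hlen : bc.length = 30) (j : Nat) (hj : j < 30) :
    (l.foldl (fun bc num => (List.range 30).foldl (fun b (j : Nat) =>
        if PySem.Int.band num ((1:Int) <<< j) ≠ 0 then b.set j (b.getD j 0 + 1) else b) bc) bc).getD j 0
      = bc.getD j 0 + cnt l j := by
  induction l generalizing bc with
  | nil => simp [cnt]
  | cons a l ih =>
    simp only [List.foldl_cons]
    rw [ih _ (by rw [inner_len]; exact hlen)]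
    rw [inner_getD a 30 bc j (by omega)]
    have hc : cnt (a :: l) j = (if bitB a j then (1:Int) else 0) + cnt l j := by simp [cnt]
    rw [hc]
    have heq : (if j < 30 ∧ bitB a j then (1:Int) else 0) = (if bitB a j then (1:Int) else 0) := by
      cases hb : bitB a j <;> simp [hj]
    rw [heq]
    ring

-- fold over range(len(arr)) indexing arr = fold over arr
lemma foldl_pyRange_getD {β : Type} (arr : List Int) (f : β → Int → β) (init : β) :
    (PySem.List.pyRange 0 (PySem.List.len arr)).foldl
        (fun acc k => f acc (PySem.List.pyGetD arr k 0)) init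
      = arr.foldl f init := by
  conv_rhs => rw [← PySem.List.map_pyGetD_pyRange_zero arr 0]
  rw [List.foldl_map]

-- A's inner reconstruction loop for one element x equals B's inner pairwise sum
lemma curr_loop_eq (arr : List Int) (x : Int) :
    ((List.range 30).foldl (fun acc (j : Nat) =>
        if PySem.Int.band x ((1:Int) <<< j) ≠ 0 then
          acc + ((PySem.List.len arr) - (arr.foldl (fun bc num => (List.range 30).foldl (fun b (j : Nat) =>
              if PySem.Int.band num ((1:Int) <<< j) ≠ 0 then b.set j (b.getD j 0 + 1) else b) bc)
            (List.replicate 30 0)).getD j 0) * ((1:Int) <<< j)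
        else
          acc + (arr.foldl (fun bc num => (List.range 30).foldl (fun b (j : Nat) =>
              if PySem.Int.band num ((1:Int) <<< j) ≠ 0 then b.set j (b.getD j 0 + 1) else b) bc)
            (List.replicate 30 0)).getD j 0 * ((1:Int) <<< j)) 0)
      = arr.foldl (fun total y =>
          total + PySem.Int.band (PySem.Int.bxor x y) (((1:Int) <<< (30:Nat)) - 1)) 0 := by
  have hbc : ∀ j : Nat, j < 30 →
      (arr.foldl (fun bc num => (List.range 30).foldl (fun b (j : Nat) =>
          if PySem.Int.band num ((1:Int) <<< j) ≠ 0 then b.set j (b.getD j 0 + 1) else b) bc)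
        (List.replicate 30 0)).getD j 0 = cnt arr j := by
    intro j hj
    rw [bc_spec arr (List.replicate 30 0) (by simp) j hj,
        List.getD_replicate (0:Int) hj, zero_add]
  have hbody : ∀ (acc : Int), ∀ j ∈ List.range 30,
      (if PySem.Int.band x ((1:Int) <<< j) ≠ 0 then
          acc + ((PySem.List.len arr) - (arr.foldl (fun bc num => (List.range 30).foldl (fun b (j : Nat) =>
              if PySem.Int.band num ((1:Int) <<< j) ≠ 0 then b.set j (b.getD j 0 + 1) else b) bc)
            (List.replicate 30 0)).getD j 0) * ((1:Int) <<< j)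
        else
          acc + (arr.foldl (fun bc num => (List.range 30).foldl (fun b (j : Nat) =>
              if PySem.Int.band num ((1:Int) <<< j) ≠ 0 then b.set j (b.getD j 0 + 1) else b) bc)
            (List.replicate 30 0)).getD j 0 * ((1:Int) <<< j))
      = acc + (if bitB x j then ((arr.length : Int) - cnt arr j) else cnt arr j) * ((2:Int)^j) := by
    intro acc j hjmem
    have hj : j < 30 := List.mem_range.mp hjmem
    by_cases hb : PySem.Int.band x ((1:Int) <<< j) ≠ 0
    · have hbit : bitB x j = true := (band_pow_ne_zero x j).mp hb
      rw [if_pos hb, hbc j hj, hbit, if_pos rfl, shl_one]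
      simp [PySem.List.len]
    · have hbit : bitB x j = false := by
        cases hx : bitB x j
        · rfl
        · exact absurd ((band_pow_ne_zero x j).mpr hx) hb
      rw [if_neg hb, hbc j hj, hbit, shl_one]
      simp
  rw [PySem.List.foldl_congr_mem _ _ _ 0 hbody]
  rw [show (List.foldl (fun acc (j : Nat) =>
        acc + (if bitB x j then ((arr.length : Int) - cnt arr j) else cnt arr j) * ((2:Int)^j)) 0
        (List.range 30))
      = 0 + ((List.range 30).map (fun j =>
          (if bitB x j then ((arr.length : Int) - cnt arr j) else cnt arr j) * ((2:Int)^j))).sum from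
    PySem.List.foldl_add _ _ 0]
  rw [zero_add, curr_eq_pairwise x arr]
  rw [show arr.foldl (fun total y =>
        total + PySem.Int.band (PySem.Int.bxor x y) (((1:Int) <<< (30:Nat)) - 1)) 0
      = 0 + (arr.map (fun y =>
          PySem.Int.band (PySem.Int.bxor x y) (((1:Int) <<< (30:Nat)) - 1))).sum from
    PySem.List.foldl_add _ _ 0]
  rw [zero_add]

set_option maxHeartbeats 1000000 in
theorem using_bitmasks_eq (arr : List Int) : using_bitmasks arr = using_bitmasks_alt arr := by
  unfold using_bitmasks using_bitmasks_alt
  dsimp only []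
  refine (PySem.List.foldl_congr_mem _ _ (fun mx k =>
      max mx (arr.foldl (fun total y =>
        total + PySem.Int.band (PySem.Int.bxor (PySem.List.pyGetD arr k 0) y)
          (((1:Int) <<< (30:Nat)) - 1)) 0)) 0 ?_).trans ?_
  · intro acc k _
    rw [curr_loop_eq arr (PySem.List.pyGetD arr k 0)]
  · exact foldl_pyRange_getD (β := Int) arr (fun best x =>
      max best (arr.foldl (fun total y =>
        total + PySem.Int.band (PySem.Int.bxor x y) (((1:Int) <<< (30:Nat)) - 1)) 0)) 0

-- ===== VERDICT (by name: the statement is the Claim_ definition above) =====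
theorem using_bitmasks_spec : Claim_equal_using_bitmasks := by
  intro arr _
  unfold Spec_using_bitmasks
  exact using_bitmasks_eq arr
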